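-- pv_equiv track=rewrite | github.com/loghithakshan/INBLOODO-AGENT26 | src/agent/agent_orchestrator.py | _sort_recommendations
-- ===== SOURCE A (Python) =====
-- from typing import Dict, List, Any, Optional
--
-- def _sort_recommendations(recommendations: List[str]) -> List[str]:
--     """Sort recommendations by priority and urgency."""
--     if not recommendations:
--         return []
--
--     def priority_score(text: str) -> tuple:
--         text_lower = text.lower()
--         # Return (priority_level, text) for sorting
--         if any(w in text_lower for w in ["immediate", "urgent", "emergency"]):
--             return (0, text)
--         elif any(w in text_lower for w in ["consult", "doctor", "provider", "medical"]):
--             return (1, text)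
--         elif any(w in text_lower for w in ["daily", "regular", "monitor"]):
--             return (2, text)
--         else:
--             return (3, text)
--
--     return sorted(recommendations, key=priority_score)
-- ===== SOURCE B (Python) =====
-- def _sort_recommendations(recommendations):
--     """Sort recommendations: bucket by priority keywords, sort each bucket, concatenate."""
--     if not recommendations:
--         return []
--
--     def bucket_index(text):
--         t = text.lower()
--         if any(w in t for w in ["immediate", "urgent", "emergency"]):
--             return 0
--         if any(w in t for w in ["consult", "doctor", "provider", "medical"]):
--             return 1
--         if any(w in t for w in ["daily", "regular", "monitor"]):
--             return 2
--         return 3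
--
--     b0, b1, b2, b3 = [], [], [], []
--     for text in recommendations:
--         n = bucket_index(text)
--         if n == 0:
--             b0.append(text)
--         elif n == 1:
--             b1.append(text)
--         elif n == 2:
--             b2.append(text)
--         else:
--             b3.append(text)
--     return sorted(b0) + sorted(b1) + sorted(b2) + sorted(b3)
-- ===== Notes on version B (the rewrite author's own statement) =====
-- stated objective: alternative
-- what changed: Replaces the single sort keyed by (priority, text) tuples with a one-pass partition of the recommendations into four priority buckets followed by a plain lexicographic sort of each bucket, concatenated in priority order.
import Mathlib
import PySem

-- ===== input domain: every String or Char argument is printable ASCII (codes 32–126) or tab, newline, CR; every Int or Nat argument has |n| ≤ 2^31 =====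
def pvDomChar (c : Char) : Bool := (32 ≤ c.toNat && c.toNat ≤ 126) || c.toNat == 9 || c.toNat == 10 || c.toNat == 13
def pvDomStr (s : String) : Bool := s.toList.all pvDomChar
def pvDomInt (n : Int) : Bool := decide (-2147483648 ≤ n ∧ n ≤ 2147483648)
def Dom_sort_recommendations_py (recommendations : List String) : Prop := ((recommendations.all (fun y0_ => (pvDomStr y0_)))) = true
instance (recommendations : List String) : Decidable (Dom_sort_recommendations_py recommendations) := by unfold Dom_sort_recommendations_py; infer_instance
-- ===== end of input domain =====

-- B replaces A's single keyed sort by a one-pass partition into four priority buckets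
-- followed by a plain sort of each bucket (objective: alternative decomposition, same cost).

-- ===== PORT A =====
-- A's priority_score returns the tuple (level, text); here the first component:
def pvPriorityK1 (text : String) : Int :=
  let text_lower := PySem.Str.lower text
  if (["immediate", "urgent", "emergency"] : List String).any (fun w => PySem.Str.isIn w text_lower) then 0
  else if (["consult", "doctor", "provider", "medical"] : List String).any (fun w => PySem.Str.isIn w text_lower) then 1
  else if (["daily", "regular", "monitor"] : List String).any (fun w => PySem.Str.isIn w text_lower) then 2
  else 3

def sort_recommendations_py (recommendations : List String) : List String :=
  if recommendations = [] then []
  else PySem.List.sorted2 recommendations pvPriorityK1 (fun t => t) false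

-- ===== PORT B =====
def pvBucketIndex (text : String) : Nat :=
  let text_lower := PySem.Str.lower text
  if (["immediate", "urgent", "emergency"] : List String).any (fun w => PySem.Str.isIn w text_lower) then 0
  else if (["consult", "doctor", "provider", "medical"] : List String).any (fun w => PySem.Str.isIn w text_lower) then 1
  else if (["daily", "regular", "monitor"] : List String).any (fun w => PySem.Str.isIn w text_lower) then 2
  else 3

def pvStep (acc : List String × List String × List String × List String) (text : String) :
    List String × List String × List String × List String :=
  let n := pvBucketIndex text
  if n == 0 then (acc.1 ++ [text], acc.2.1, acc.2.2.1, acc.2.2.2)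
  else if n == 1 then (acc.1, acc.2.1 ++ [text], acc.2.2.1, acc.2.2.2)
  else if n == 2 then (acc.1, acc.2.1, acc.2.2.1 ++ [text], acc.2.2.2)
  else (acc.1, acc.2.1, acc.2.2.1, acc.2.2.2 ++ [text])

def sort_recommendations_py_alt (recommendations : List String) : List String :=
  if recommendations = [] then []
  else
    let b := recommendations.foldl pvStep ([], [], [], [])
    PySem.List.sorted b.1 (fun x => x) false ++ PySem.List.sorted b.2.1 (fun x => x) false ++
      PySem.List.sorted b.2.2.1 (fun x => x) false ++ PySem.List.sorted b.2.2.2 (fun x => x) false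

-- ===== PRECONDITION & SPEC =====
def Spec_sort_recommendations_py (recommendations : List String) (out : List String) : Prop := out = sort_recommendations_py_alt recommendations
instance (recommendations : List String) (out : List String) : Decidable (Spec_sort_recommendations_py recommendations out) := by unfold Spec_sort_recommendations_py; infer_instance

-- ===== CLAIM (what is proved, stated in full; the proofs are below) =====
def Claim_equal_sort_recommendations_py : Prop := ∀ (recommendations : List String), Dom_sort_recommendations_py recommendations → Spec_sort_recommendations_py recommendations (sort_recommendations_py recommendations)

-- ===== LEMMAS AND PROOFS =====

-- the lexicographic sort key A's tuple (level, text) denotes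
def pvKey (t : String) : Lex (Int × String) := toLex (pvPriorityK1 t, t)

theorem pvKey_injective : Function.Injective pvKey := by
  intro a b h
  have := congrArg (fun p : Lex (Int × String) => (ofLex p).2) h
  simpa [pvKey] using this

theorem pvPriorityK1_eq (t : String) : pvPriorityK1 t = (pvBucketIndex t : Int) := by
  simp only [pvPriorityK1, pvBucketIndex]
  split_ifs <;> rfl

-- A's tuple-key sort IS the sort by the lexicographic key pvKey
theorem sorted2_eq_sorted_pvKey (xs : List String) :
    PySem.List.sorted2 xs pvPriorityK1 (fun t => t) false = PySem.List.sorted xs pvKey false := by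
  have hb : (fun a b : String =>
      decide (pvPriorityK1 a < pvPriorityK1 b) ||
        !decide (pvPriorityK1 b < pvPriorityK1 a) && decide (a < b)) =
      (fun a b : String => decide (pvKey a < pvKey b)) := by
    funext a b
    rw [Bool.eq_iff_iff]
    simp only [Bool.or_eq_true, Bool.and_eq_true, Bool.not_eq_true', decide_eq_true_eq,
      decide_eq_false_iff_not, pvKey, Prod.Lex.toLex_lt_toLex]
    rcases lt_trichotomy (pvPriorityK1 a) (pvPriorityK1 b) with h | h | h
    · simp [h]
    · simp [h, lt_irrefl]
    · constructor
      · rintro (h' | ⟨h1, _⟩)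
        · exact absurd h' h.asymm
        · exact absurd h h1
      · rintro (h' | ⟨h1, _⟩)
        · exact absurd h' h.asymm
        · exact absurd h1 h.ne'
  unfold PySem.List.sorted2 PySem.List.sorted
  simp only [Bool.false_eq_true, if_false]
  rw [hb]

def pvQ0 (x : String) : Bool := pvBucketIndex x == 0
def pvQ1 (x : String) : Bool := pvBucketIndex x == 1
def pvQ2 (x : String) : Bool := pvBucketIndex x == 2
def pvQ3 (x : String) : Bool := !(pvBucketIndex x == 0 || pvBucketIndex x == 1 || pvBucketIndex x == 2)

theorem foldl_pvStep (xs : List String) (a b c d : List String) :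
    xs.foldl pvStep (a, b, c, d) =
      (a ++ xs.filter pvQ0, b ++ xs.filter pvQ1, c ++ xs.filter pvQ2, d ++ xs.filter pvQ3) := by
  induction xs generalizing a b c d with
  | nil => simp
  | cons x t ih =>
    simp only [List.foldl_cons, List.filter_cons, pvStep, pvQ0, pvQ1, pvQ2, pvQ3]
    by_cases h0 : pvBucketIndex x = 0
    · simp [h0, ih, List.append_assoc]
    · by_cases h1 : pvBucketIndex x = 1
      · simp [h1, ih, List.append_assoc]
      · by_cases h2 : pvBucketIndex x = 2
        · simp [h2, ih, List.append_assoc]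
        · simp [h0, h1, h2, ih, List.append_assoc]

theorem perm_cons_mid3 {α : Type} (l0 l1 l2 : List α) (x : α) :
    (l0 ++ (l1 ++ (x :: l2))).Perm (x :: (l0 ++ (l1 ++ l2))) :=
  ((List.perm_middle (a := x) (l₁ := l1) (l₂ := l2)).append_left l0).trans List.perm_middle

theorem perm_cons_mid4 {α : Type} (l0 l1 l2 l3 : List α) (x : α) :
    (l0 ++ (l1 ++ (l2 ++ (x :: l3)))).Perm (x :: (l0 ++ (l1 ++ (l2 ++ l3)))) :=
  ((perm_cons_mid3 l1 l2 l3 x).append_left l0).trans List.perm_middle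

theorem filters_perm (xs : List String) :
    (xs.filter pvQ0 ++ (xs.filter pvQ1 ++ (xs.filter pvQ2 ++ xs.filter pvQ3))).Perm xs := by
  induction xs with
  | nil => simp
  | cons x t ih =>
    simp only [List.filter_cons, pvQ0, pvQ1, pvQ2, pvQ3]
    by_cases h0 : pvBucketIndex x = 0
    · simpa [h0] using ih.cons x
    · by_cases h1 : pvBucketIndex x = 1
      · refine List.Perm.trans ?_ (ih.cons x)
        simp [h1]
      · by_cases h2 : pvBucketIndex x = 2
        · refine List.Perm.trans ?_ (ih.cons x)
          simp [h2]
          exact perm_cons_mid3 _ _ _ x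
        · refine List.Perm.trans ?_ (ih.cons x)
          simp [h0, h1, h2]
          exact perm_cons_mid4 _ _ _ _ x

theorem pairwise_sorted_bucket (l : List String) {n : Nat}
    (h : ∀ y ∈ l, pvBucketIndex y = n) :
    (PySem.List.sorted l (fun x => x) false).Pairwise (fun a b => pvKey a ≤ pvKey b) := by
  have hp := PySem.List.sorted_pairwise l (fun x => x)
  refine hp.imp_of_mem ?_
  intro a b ha hb hab
  have ha' := h a ((PySem.List.mem_sorted _ _ _ _).1 ha)
  have hb' := h b ((PySem.List.mem_sorted _ _ _ _).1 hb)
  simp only [pvKey, Prod.Lex.toLex_le_toLex]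
  exact Or.inr ⟨by rw [pvPriorityK1_eq, pvPriorityK1_eq, ha', hb'], hab⟩

theorem pairwise_append_lt {l₁ l₂ : List String}
    (h : ∀ a ∈ l₁, ∀ b ∈ l₂, pvBucketIndex a < pvBucketIndex b)
    (p₁ : l₁.Pairwise (fun a b => pvKey a ≤ pvKey b))
    (p₂ : l₂.Pairwise (fun a b => pvKey a ≤ pvKey b)) :
    (l₁ ++ l₂).Pairwise (fun a b => pvKey a ≤ pvKey b) := by
  rw [List.pairwise_append]
  refine ⟨p₁, p₂, ?_⟩
  intro a ha b hb
  simp only [pvKey, Prod.Lex.toLex_le_toLex]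
  left
  rw [pvPriorityK1_eq, pvPriorityK1_eq]
  exact_mod_cast h a ha b hb

theorem sort_recommendations_py_eq (recommendations : List String) :
    sort_recommendations_py recommendations = sort_recommendations_py_alt recommendations := by
  by_cases hnil : recommendations = []
  · simp [sort_recommendations_py, sort_recommendations_py_alt, hnil]
  · unfold sort_recommendations_py sort_recommendations_py_alt
    rw [if_neg hnil, if_neg hnil, sorted2_eq_sorted_pvKey,
      foldl_pvStep recommendations [] [] [] []]
    simp only [List.nil_append, List.append_assoc]
    set f0 := recommendations.filter pvQ0 with hf0
    set f1 := recommendations.filter pvQ1 with hf1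
    set f2 := recommendations.filter pvQ2 with hf2
    set f3 := recommendations.filter pvQ3 with hf3
    have hm0 : ∀ y ∈ f0, pvBucketIndex y = 0 := fun y hy =>
      by simpa [pvQ0] using List.of_mem_filter hy
    have hm1 : ∀ y ∈ f1, pvBucketIndex y = 1 := fun y hy =>
      by simpa [pvQ1] using List.of_mem_filter hy
    have hm2 : ∀ y ∈ f2, pvBucketIndex y = 2 := fun y hy =>
      by simpa [pvQ2] using List.of_mem_filter hy
    have hm3 : ∀ y ∈ f3, pvBucketIndex y = 3 := by
      intro y hy
      have hq := List.of_mem_filter hy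
      simp only [pvQ3, Bool.not_eq_true', Bool.or_eq_false_iff, beq_eq_false_iff_ne] at hq
      have hle : pvBucketIndex y ≤ 3 := by
        simp only [pvBucketIndex]
        split_ifs <;> omega
      omega
    have hs0 : ∀ y ∈ PySem.List.sorted f0 (fun x => x) false, pvBucketIndex y = 0 :=
      fun y hy => hm0 y ((PySem.List.mem_sorted _ _ _ _).1 hy)
    have hs1 : ∀ y ∈ PySem.List.sorted f1 (fun x => x) false, pvBucketIndex y = 1 :=
      fun y hy => hm1 y ((PySem.List.mem_sorted _ _ _ _).1 hy)
    have hs2 : ∀ y ∈ PySem.List.sorted f2 (fun x => x) false, pvBucketIndex y = 2 :=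
      fun y hy => hm2 y ((PySem.List.mem_sorted _ _ _ _).1 hy)
    have hs3 : ∀ y ∈ PySem.List.sorted f3 (fun x => x) false, pvBucketIndex y = 3 :=
      fun y hy => hm3 y ((PySem.List.mem_sorted _ _ _ _).1 hy)
    have pw23 := pairwise_append_lt
      (fun a ha b hb => by rw [hs2 a ha, hs3 b hb]; omega)
      (pairwise_sorted_bucket f2 hm2) (pairwise_sorted_bucket f3 hm3)
    have pw123 := pairwise_append_lt
      (fun a ha b hb => by
        rcases List.mem_append.1 hb with h | h
        · rw [hs1 a ha, hs2 b h]; omega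
        · rw [hs1 a ha, hs3 b h]; omega)
      (pairwise_sorted_bucket f1 hm1) pw23
    have pwB := pairwise_append_lt
      (fun a ha b hb => by
        rcases List.mem_append.1 hb with h | h
        · rw [hs0 a ha, hs1 b h]; omega
        · rcases List.mem_append.1 h with h' | h'
          · rw [hs0 a ha, hs2 b h']; omega
          · rw [hs0 a ha, hs3 b h']; omega)
      (pairwise_sorted_bucket f0 hm0) pw123
    have pwA : (PySem.List.sorted recommendations pvKey false).Pairwise
        (fun a b => pvKey a ≤ pvKey b) := PySem.List.sorted_pairwise recommendations pvKey
    have permB : (PySem.List.sorted f0 (fun x => x) false ++ (PySem.List.sorted f1 (fun x => x) false ++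
        (PySem.List.sorted f2 (fun x => x) false ++ PySem.List.sorted f3 (fun x => x) false))).Perm
        recommendations :=
      ((PySem.List.sorted_perm f0 (fun x => x) false).append
        ((PySem.List.sorted_perm f1 (fun x => x) false).append
          ((PySem.List.sorted_perm f2 (fun x => x) false).append
            (PySem.List.sorted_perm f3 (fun x => x) false)))).trans (filters_perm recommendations)
    have permA : (PySem.List.sorted recommendations pvKey false).Perm recommendations :=
      PySem.List.sorted_perm recommendations pvKey false
    exact PySem.List.eq_of_perm_of_pairwise_le_of_injective pvKey pvKey_injective
      (permA.trans permB.symm) pwA pwB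

-- ===== VERDICT (by name: the statement is the Claim_ definition above) =====
theorem sort_recommendations_py_spec : Claim_equal_sort_recommendations_py := by
  intro recommendations _
  unfold Spec_sort_recommendations_py
  exact sort_recommendations_py_eq recommendations
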